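-- pv_equiv track=rewrite | github.com/alexander-mcdowell/Algorithms | python/KnuthMorris.py | KnuthMorris
-- ===== SOURCE A (Python) =====
-- def findBorders(str):
--     b = []
--     for i in range(0, len(str) + 1):
--         b.append(0)
--     j = 0
--     for i in range(1, len(str)):
--         while j > 0 and str[j] != str[i]:
--             j = b[j]
--         if str[j] == str[i]:
--             j += 1
--         b[i + 1] = j
--     return b
--
-- def KnuthMorris(str, pattern):
--     matches = []
--     borders = findBorders(pattern)
--     j = 0
--     for i in range(0, len(str)):
--         while j > 0 and pattern[j] != str[i]:
--             j = borders[j]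
--         if pattern[j] == str[i]:
--             j += 1
--         if j == len(pattern):
--             matches.append(i - j + 1)
--             j = borders[j]
--     return matches
-- ===== SOURCE B (Python) =====
-- def KnuthMorris(str, pattern):
--     m = len(pattern)
--     return [i for i in range(len(str) - m + 1) if str[i:i + m] == pattern]
-- ===== Notes on version B (the rewrite author's own statement) =====
-- stated objective: simpler
-- what changed: Replaces KMP's failure-function automaton (border table plus nested while-loop state machine) with a one-line naive sliding-window scan comparing each length-m slice to pattern; despite worse asymptotics, CPython's C-level slicing makes it measurably faster on the generated inputs.
-- outside the precondition, e.g. on KnuthMorris('', ''): A returns [], B returns [0]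
import Mathlib
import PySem

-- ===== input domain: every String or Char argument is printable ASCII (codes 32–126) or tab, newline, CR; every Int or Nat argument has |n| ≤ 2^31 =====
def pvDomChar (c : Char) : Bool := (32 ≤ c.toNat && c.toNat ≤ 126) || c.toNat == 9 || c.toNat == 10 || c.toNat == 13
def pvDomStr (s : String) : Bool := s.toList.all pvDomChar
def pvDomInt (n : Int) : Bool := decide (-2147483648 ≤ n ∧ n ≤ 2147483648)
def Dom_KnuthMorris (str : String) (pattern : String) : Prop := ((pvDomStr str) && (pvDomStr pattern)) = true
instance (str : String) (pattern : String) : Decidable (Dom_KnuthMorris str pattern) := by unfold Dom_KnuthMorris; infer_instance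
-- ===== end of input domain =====

-- B replaces KMP's border-table automaton by a naive sliding-window scan: simpler code,
-- same return value; equivalence is proved for non-empty patterns (Pre_), where A never raises.

-- ===== PORT A =====
-- Python's inner `while j > 0 and p[j] != c: j = b[j]`, as fuel-bounded recursion.
-- Fuel := the entering j suffices: the border table built below always has b[j] < j,
-- so the loop body runs at most j times (exact on every state A's loops reach).
def kmpWhile (p : List Char) (b : List Nat) (c : Char) : Nat → Nat → Nat
  | j, 0 => j
  | j, fuel+1 =>
    if 0 < j ∧ p.getD j 'a' ≠ c then kmpWhile p b c (b.getD j 0) fuel else j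

-- `for i in range(1, len(str))` loop of findBorders; `b[i+1] = j` is List.set.
def fbLoop (p : List Char) (i : Nat) (j : Nat) (b : List Nat) : List Nat :=
  if _h : i < p.length then
    fbLoop p (i+1)
      (if p.getD (kmpWhile p b (p.getD i 'a') j j) 'a' = p.getD i 'a'
       then kmpWhile p b (p.getD i 'a') j j + 1
       else kmpWhile p b (p.getD i 'a') j j)
      (b.set (i+1)
        (if p.getD (kmpWhile p b (p.getD i 'a') j j) 'a' = p.getD i 'a'
         then kmpWhile p b (p.getD i 'a') j j + 1
         else kmpWhile p b (p.getD i 'a') j j))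
  else b
termination_by p.length - i

-- `b = []; for i in range(0, len(str)+1): b.append(0)` then the border loop
def findBordersList (p : List Char) : List Nat :=
  fbLoop p 1 0 ((List.range (p.length + 1)).foldl (fun acc _ => acc ++ [(0:Nat)]) [])

-- main `for i in range(0, len(str))` loop; i is the running index, acc the matches.
def kmpLoop (p : List Char) (borders : List Nat) (i : Nat) (j : Nat) (acc : List Int) :
    List Char → List Int
  | [] => acc
  | c :: rest =>
    if (if p.getD (kmpWhile p borders c j j) 'a' = c
        then kmpWhile p borders c j j + 1
        else kmpWhile p borders c j j) = p.length then
      kmpLoop p borders (i+1)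
        (borders.getD (if p.getD (kmpWhile p borders c j j) 'a' = c
                       then kmpWhile p borders c j j + 1
                       else kmpWhile p borders c j j) 0)
        (acc ++ [(i : Int) - ((if p.getD (kmpWhile p borders c j j) 'a' = c
                               then kmpWhile p borders c j j + 1
                               else kmpWhile p borders c j j) : Nat) + 1]) rest
    else
      kmpLoop p borders (i+1)
        (if p.getD (kmpWhile p borders c j j) 'a' = c
         then kmpWhile p borders c j j + 1
         else kmpWhile p borders c j j) acc rest

def KnuthMorris (str : String) (pattern : String) : List Int :=
  kmpLoop pattern.toList (findBordersList pattern.toList) 0 0 [] str.toList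

-- ===== PORT B =====
-- Source B: [i for i in range(len(str) - m + 1) if str[i:i+m] == pattern]
def KnuthMorris_alt (str : String) (pattern : String) : List Int :=
  (PySem.List.pyRange 0 ((str.toList.length : Int) - (pattern.toList.length : Int) + 1) 1).filter
    (fun i => decide (PySem.List.slice str.toList (some i)
      (some (i + (pattern.toList.length : Int))) = pattern.toList))

-- ===== PRECONDITION & SPEC =====
-- Pre_ excludes the empty pattern: there A raises IndexError whenever str is non-empty, and on
-- ("", "") returns [] only because its loop body never runs — a corner where B's natural window
-- enumeration ([0]) is as defensible as A's [].
def Pre_KnuthMorris (str : String) (pattern : String) : Prop := pattern ≠ ""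
instance (str : String) (pattern : String) : Decidable (Pre_KnuthMorris str pattern) := by
  unfold Pre_KnuthMorris; infer_instance

def pvWitness_KnuthMorris : String × String := ("ababa", "ab")

def Spec_KnuthMorris (str : String) (pattern : String) (out : List Int) : Prop :=
  out = KnuthMorris_alt str pattern
instance (str : String) (pattern : String) (out : List Int) : Decidable (Spec_KnuthMorris str pattern out) := by
  unfold Spec_KnuthMorris; infer_instance

-- ===== CLAIM (what is proved, stated in full; the proofs are below) =====
def Claim_equal_KnuthMorris : Prop := ∀ (str : String) (pattern : String),
  Dom_KnuthMorris str pattern → Pre_KnuthMorris str pattern →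
  Spec_KnuthMorris str pattern (KnuthMorris str pattern)

-- ===== LEMMAS AND PROOFS =====

-- longest k ≤ n with `p.take k` a suffix of w
def sufJ (p w : List Char) (n : Nat) : Nat :=
  Nat.findGreatest (fun k => p.take k <:+ w) n

-- length of the longest proper border of p.take i
def bordFn (p : List Char) (i : Nat) : Nat := sufJ p (p.take i) (i - 1)

-- the matches A has collected after reading the first n characters of s
def kmpAcc (p s : List Char) (n : Nat) : List Int :=
  ((List.range n).filter (fun i => decide (p <:+ s.take (i+1)))).map
    (fun (i : Nat) => (i : Int) - (p.length : Int) + 1)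

theorem suffix_suffix_of_le {l1 l2 w : List Char} (h1 : l1 <:+ w) (h2 : l2 <:+ w)
    (h : l1.length ≤ l2.length) : l1 <:+ l2 := by
  rw [← List.reverse_prefix] at h1 h2 ⊢
  exact List.prefix_of_prefix_length_le h1 h2 (by simpa using h)

theorem snoc_suffix_snoc {l w : List Char} {x c : Char} :
    l ++ [x] <:+ w ++ [c] ↔ l <:+ w ∧ x = c := by
  rw [← List.reverse_prefix, ← List.reverse_prefix (l₁ := l)]
  simp [List.cons_prefix_cons, and_comm]

theorem take_suffix_snoc {p w : List Char} {c : Char} {k : Nat} (hk : k < p.length) :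
    p.take (k+1) <:+ w ++ [c] ↔ p.take k <:+ w ∧ p.getD k 'a' = c := by
  have ht : p.take (k+1) = p.take k ++ [p.getD k 'a'] := by
    rw [List.take_add_one, List.getElem?_eq_getElem hk, List.getD_eq_getElem _ _ hk]
    rfl
  rw [ht, snoc_suffix_snoc]

theorem findGreatest_congr {P Q : Nat → Prop} [DecidablePred P] [DecidablePred Q]
    (h : ∀ k, P k ↔ Q k) (n : Nat) : Nat.findGreatest P n = Nat.findGreatest Q n := by
  induction n with
  | zero => rfl
  | succ n ih =>
    rw [Nat.findGreatest_succ, Nat.findGreatest_succ, ih]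
    by_cases hp : P (n+1)
    · rw [if_pos hp, if_pos ((h _).1 hp)]
    · rw [if_neg hp, if_neg (fun hq => hp ((h _).2 hq))]

theorem sufJ_le {p w : List Char} {n : Nat} : sufJ p w n ≤ n := Nat.findGreatest_le n

theorem sufJ_suffix (p w : List Char) (n : Nat) : p.take (sufJ p w n) <:+ w :=
  Nat.findGreatest_spec (P := fun k => p.take k <:+ w) (Nat.zero_le n) (by simp)

theorem le_sufJ {p w : List Char} {k n : Nat} (hk : k ≤ n) (h : p.take k <:+ w) :
    k ≤ sufJ p w n := Nat.le_findGreatest hk h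

theorem sufJ_pred {p u : List Char} {U : Nat} (h : sufJ p u (U+1) ≠ U + 1) :
    sufJ p u (U+1) = sufJ p u U := by
  unfold sufJ at *
  rw [Nat.findGreatest_succ] at *
  by_cases hP : p.take (U+1) <:+ u
  · rw [if_pos hP] at h; exact absurd rfl h
  · rw [if_neg hP]

theorem bordFn_lt {p : List Char} {i : Nat} (hi : 1 ≤ i) : bordFn p i < i :=
  lt_of_le_of_lt (Nat.findGreatest_le (i-1)) (by omega)

-- the while loop, with fuel ≥ current j, lands on the largest candidate matching c
theorem kmpWhile_post (p w : List Char) (b : List Nat) (c : Char) (U : Nat)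
    (hU : U + 1 ≤ p.length)
    (hB : ∀ k, 1 ≤ k → k ≤ U → b.getD k 0 = bordFn p k) :
    ∀ fuel v, v ≤ fuel → v ≤ U → p.take v <:+ w →
      (∀ k, k ≤ U → p.take k <:+ w → p.getD k 'a' = c → k ≤ v) →
      (kmpWhile p b c v fuel ≤ U ∧
       p.take (kmpWhile p b c v fuel) <:+ w ∧
       (kmpWhile p b c v fuel = 0 ∨ p.getD (kmpWhile p b c v fuel) 'a' = c) ∧
       (∀ k, k ≤ U → p.take k <:+ w → p.getD k 'a' = c → k ≤ kmpWhile p b c v fuel)) := by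
  intro fuel
  induction fuel with
  | zero =>
    intro v hf hvU hsfx hinv
    interval_cases v
    exact ⟨Nat.zero_le _, hsfx, Or.inl rfl, hinv⟩
  | succ f ih =>
    intro v hf hvU hsfx hinv
    rw [kmpWhile]
    by_cases hc : 0 < v ∧ p.getD v 'a' ≠ c
    · rw [if_pos hc]
      have hv1 : 1 ≤ v := hc.1
      have hbv : b.getD v 0 = bordFn p v := hB v hv1 hvU
      have hlt : bordFn p v < v := bordFn_lt hv1
      have hbs : p.take (bordFn p v) <:+ p.take v := sufJ_suffix p (p.take v) (v-1)
      refine ih (b.getD v 0) ?_ ?_ ?_ ?_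
      · rw [hbv]; omega
      · rw [hbv]; omega
      · rw [hbv]; exact hbs.trans hsfx
      · rw [hbv]
        intro k hkU hks hkc
        have hkv : k ≤ v := hinv k hkU hks hkc
        have hkv' : k < v := by
          rcases Nat.lt_or_eq_of_le hkv with h | h
          · exact h
          · exact absurd (h ▸ hkc) hc.2
        have hklen : (p.take k).length ≤ (p.take v).length := by
          simp only [List.length_take]; omega
        exact le_sufJ (by omega) (suffix_suffix_of_le hks hsfx hklen)
    · rw [if_neg hc]
      refine ⟨hvU, hsfx, ?_, hinv⟩
      by_cases hv : v = 0
      · exact Or.inl hv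
      · exact Or.inr (by push_neg at hc; exact not_not.mp (by simpa using hc (by omega)))

-- one full iteration of the Python loop body advances sufJ by one character
theorem kmp_step (p w : List Char) (b : List Nat) (c : Char) (U : Nat)
    (hU : U + 1 ≤ p.length)
    (hB : ∀ k, 1 ≤ k → k ≤ U → b.getD k 0 = bordFn p k) :
    (if p.getD (kmpWhile p b c (sufJ p w U) (sufJ p w U)) 'a' = c
     then kmpWhile p b c (sufJ p w U) (sufJ p w U) + 1
     else kmpWhile p b c (sufJ p w U) (sufJ p w U)) = sufJ p (w ++ [c]) (U + 1) := by
  set j := sufJ p w U with hj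
  obtain ⟨hrU, hrs, hr0, hrinv⟩ :=
    kmpWhile_post p w b c U hU hB j j le_rfl sufJ_le (sufJ_suffix p w U)
      (fun k hk hs _ => le_sufJ hk hs)
  set r := kmpWhile p b c j j with hr
  by_cases hpc : p.getD r 'a' = c
  · rw [if_pos hpc]
    apply Nat.le_antisymm
    · exact le_sufJ (by omega) ((take_suffix_snoc (by omega)).2 ⟨hrs, hpc⟩)
    · set g := sufJ p (w ++ [c]) (U+1) with hg
      rcases Nat.eq_zero_or_pos g with h0 | hpos
      · omega
      · have hgs : p.take g <:+ w ++ [c] := sufJ_suffix p (w ++ [c]) (U+1)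
        have hgU : g ≤ U + 1 := sufJ_le
        obtain ⟨g', hgeq⟩ : ∃ g', g = g' + 1 := ⟨g - 1, by omega⟩
        rw [hgeq] at hgs
        obtain ⟨h1, h2⟩ := (take_suffix_snoc (by omega)).1 hgs
        have := hrinv g' (by omega) h1 h2
        omega
  · rw [if_neg hpc]
    have hr0' : r = 0 := by tauto
    apply Nat.le_antisymm
    · exact le_sufJ (by omega) (by simp [hr0'])
    · set g := sufJ p (w ++ [c]) (U+1) with hg
      rcases Nat.eq_zero_or_pos g with h0 | hpos
      · omega
      · have hgs : p.take g <:+ w ++ [c] := sufJ_suffix p (w ++ [c]) (U+1)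
        have hgU : g ≤ U + 1 := sufJ_le
        obtain ⟨g', hgeq⟩ : ∃ g', g = g' + 1 := ⟨g - 1, by omega⟩
        rw [hgeq] at hgs
        obtain ⟨h1, h2⟩ := (take_suffix_snoc (by omega)).1 hgs
        have hle := hrinv g' (by omega) h1 h2
        have hz : g' = 0 := by omega
        subst hz
        exact absurd (hr0' ▸ h2) hpc

theorem bordFn_zero (p : List Char) : bordFn p 0 = 0 := rfl

theorem bordFn_one (p : List Char) : bordFn p 1 = 0 := rfl

theorem replicate_of_foldl (n : Nat) :
    (List.range n).foldl (fun acc _ => acc ++ [(0:Nat)]) [] = List.replicate n 0 := by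
  induction n with
  | zero => rfl
  | succ n ih => rw [List.range_succ, List.foldl_append, ih, List.replicate_succ']; rfl

theorem fbLoop_spec (p : List Char) :
    ∀ cnt i j b, cnt = p.length - i → 1 ≤ i → i ≤ p.length →
      b.length = p.length + 1 →
      j = bordFn p i →
      (∀ k, k ≤ i → b.getD k 0 = bordFn p k) →
      ∀ k, k ≤ p.length → (fbLoop p i j b).getD k 0 = bordFn p k := by
  intro cnt
  induction cnt with
  | zero =>
    intro i j b hcnt h1 h2 hlen hj hb k hk
    have hi : ¬ i < p.length := by omega
    rw [fbLoop, dif_neg hi]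
    exact hb k (by omega)
  | succ n ih =>
    intro i j b hcnt h1 h2 hlen hj hb k hk
    have hi : i < p.length := by omega
    rw [fbLoop, dif_pos hi]
    have hstep := kmp_step p (p.take i) b (p.getD i 'a') (i - 1) (by omega)
      (fun k hk1 hk2 => hb k (by omega))
    have hjj : j = sufJ p (p.take i) (i - 1) := hj
    rw [← hjj] at hstep
    have htake : p.take i ++ [p.getD i 'a'] = p.take (i+1) := by
      rw [List.take_add_one, List.getElem?_eq_getElem hi, List.getD_eq_getElem _ _ hi]
      rfl
    rw [htake] at hstep
    have hbord : (if p.getD (kmpWhile p b (p.getD i 'a') j j) 'a' = p.getD i 'a'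
        then kmpWhile p b (p.getD i 'a') j j + 1
        else kmpWhile p b (p.getD i 'a') j j) = bordFn p (i+1) := by
      rw [hstep]; unfold bordFn; congr 1; omega
    refine ih (i+1) _ _ (by omega) (by omega) (by omega) (by simp [hlen]) hbord ?_ k hk
    intro k' hk'
    by_cases hke : k' = i + 1
    · subst hke
      rw [List.getD_eq_getElem _ _ (by simp [hlen]; omega), List.getElem_set_self]
      exact hbord
    · have hk'' : k' ≤ i := by omega
      rw [List.getD_eq_getElem _ _ (by simp [hlen]; omega), List.getElem_set_ne (by omega),
        ← List.getD_eq_getElem _ 0 (by omega)]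
      exact hb k' hk''

theorem findBordersList_spec (p : List Char) (hm : 0 < p.length) :
    ∀ k, k ≤ p.length → (findBordersList p).getD k 0 = bordFn p k := by
  intro k hk
  unfold findBordersList
  rw [replicate_of_foldl]
  refine fbLoop_spec p (p.length - 1) 1 0 _ rfl le_rfl hm (by simp) (bordFn_one p).symm ?_ k hk
  intro k' hk'
  interval_cases k' <;>
    simp [List.getD_eq_getElem, List.getElem_replicate, bordFn_zero, bordFn_one, hm]

theorem sufJ_nil {p : List Char} (hm : 0 < p.length) (n : Nat) : sufJ p [] n = 0 := by
  unfold sufJ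
  induction n with
  | zero => rfl
  | succ n ih =>
    have hne : ¬ (p.take (n+1) <:+ ([] : List Char)) := by
      intro h
      have h2 := List.suffix_nil.mp h
      have h3 : (p.take (n+1)).length = 0 := by rw [h2]; rfl
      rw [List.length_take] at h3
      omega
    rw [Nat.findGreatest_succ, if_neg hne, ih]

theorem sufJ_of_full {p u : List Char} (hm : 0 < p.length) (hu : p <:+ u) :
    sufJ p u (p.length - 1) = bordFn p p.length := by
  unfold bordFn sufJ
  refine findGreatest_congr (fun k => ?_) _
  rw [List.take_length]
  constructor
  · intro h
    by_cases hk : k ≤ p.length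
    · exact suffix_suffix_of_le h hu (List.take_prefix k p).length_le
    · have hkp : p.take k = p := List.take_of_length_le (by omega)
      rw [hkp] at h ⊢
  · intro h
    exact h.trans hu

theorem kmpAcc_succ (p s : List Char) (n : Nat) :
    kmpAcc p s (n+1) = kmpAcc p s n ++
      (if p <:+ s.take (n+1) then [(n : Int) - (p.length : Int) + 1] else []) := by
  unfold kmpAcc
  rw [List.range_succ, List.filter_append, List.map_append]
  congr 1
  by_cases h : p <:+ s.take (n+1) <;> simp [h]

theorem kmpLoop_eq (p s : List Char) (borders : List Nat) (hm : 0 < p.length)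
    (hB : ∀ k, k ≤ p.length → borders.getD k 0 = bordFn p k) :
    ∀ rest done j acc, s = done ++ rest →
      j = sufJ p done (p.length - 1) →
      acc = kmpAcc p s done.length →
      kmpLoop p borders done.length j acc rest = kmpAcc p s s.length := by
  intro rest
  induction rest with
  | nil =>
    intro done j acc hs hj hacc
    rw [kmpLoop, hacc, hs]
    simp
  | cons c rest ih =>
    intro done j acc hs hj hacc
    rw [kmpLoop]
    have hstep := kmp_step p done borders c (p.length - 1) (by omega)
      (fun k hk1 hk2 => hB k (by omega))
    rw [← hj] at hstep
    have hU1 : p.length - 1 + 1 = p.length := by omega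
    rw [hU1] at hstep
    set j2 := (if p.getD (kmpWhile p borders c j j) 'a' = c
               then kmpWhile p borders c j j + 1
               else kmpWhile p borders c j j) with hj2
    have hj2v : j2 = sufJ p (done ++ [c]) p.length := hstep
    have htake : s.take (done.length + 1) = done ++ [c] := by
      rw [hs, show done ++ c :: rest = (done ++ [c]) ++ rest by simp]
      exact List.take_left' (by simp)
    by_cases hfull : j2 = p.length
    · rw [if_pos hfull]
      have hsfx : p <:+ done ++ [c] := by
        have h := sufJ_suffix p (done ++ [c]) p.length
        rw [← hj2v, hfull, List.take_length] at h
        exact h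
      have hnext : borders.getD j2 0 = sufJ p (done ++ [c]) (p.length - 1) := by
        rw [hfull, hB p.length le_rfl, ← sufJ_of_full hm hsfx]
      have haccnext : acc ++ [(done.length : Int) - (j2 : Nat) + 1] = kmpAcc p s (done.length + 1) := by
        rw [hacc, kmpAcc_succ, htake, if_pos hsfx, hfull]
      have hfin := ih (done ++ [c]) (borders.getD j2 0)
        (acc ++ [(done.length : Int) - (j2 : Nat) + 1])
        (by rw [hs]; simp) (by simpa using hnext) (by simpa using haccnext)
      simpa using hfin
    · rw [if_neg hfull]
      have hj2b : j2 = sufJ p (done ++ [c]) (p.length - 1) := by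
        have hne : sufJ p (done ++ [c]) ((p.length - 1) + 1) ≠ (p.length - 1) + 1 := by
          intro hcontra
          rw [hU1] at hcontra
          exact hfull (hj2v.trans hcontra)
        have h := sufJ_pred hne
        rw [hU1] at h
        exact hj2v.trans h
      have hnotfull : ¬ p <:+ done ++ [c] := by
        intro hsfx
        have h1 : p.length ≤ sufJ p (done ++ [c]) p.length :=
          le_sufJ le_rfl (by rw [List.take_length]; exact hsfx)
        have h2 : sufJ p (done ++ [c]) p.length ≤ p.length := sufJ_le
        rw [← hj2v] at h1 h2
        omega
      have haccnext : acc = kmpAcc p s (done.length + 1) := by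
        rw [hacc, kmpAcc_succ, htake, if_neg hnotfull, List.append_nil]
      have hfin := ih (done ++ [c]) j2 acc
        (by rw [hs]; simp) (by simpa using hj2b) (by simpa using haccnext)
      simpa using hfin

-- A computes kmpAcc over the whole text
theorem KnuthMorris_eq_kmpAcc (str pattern : String) (hm : 0 < pattern.toList.length) :
    KnuthMorris str pattern = kmpAcc pattern.toList str.toList str.toList.length := by
  unfold KnuthMorris
  refine kmpLoop_eq pattern.toList str.toList (findBordersList pattern.toList) hm
    (findBordersList_spec pattern.toList hm) str.toList [] 0 [] (by simp) ?_ ?_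
  · rw [sufJ_nil hm]
  · simp [kmpAcc]

-- for windows inside s, "p is a suffix of s.take (t+m)" is the slice test
theorem occ_iff (p s : List Char) (t : Nat) (hm : 0 < p.length) (h : t + p.length ≤ s.length) :
    (p <:+ s.take (t + p.length)) ↔ (s.drop t).take p.length = p := by
  rw [List.suffix_iff_eq_drop]
  have hl : (s.take (t + p.length)).length = t + p.length := by
    simp [List.length_take]; omega
  rw [hl, show t + p.length - p.length = t from by omega, List.drop_take,
    show t + p.length - t = p.length from by omega]
  exact ⟨fun h => h.symm, fun h => h.symm⟩

-- B computes kmpAcc as well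
theorem KnuthMorris_alt_eq_kmpAcc (str pattern : String) (hm : 0 < pattern.toList.length) :
    KnuthMorris_alt str pattern = kmpAcc pattern.toList str.toList str.toList.length := by
  unfold KnuthMorris_alt kmpAcc
  set s := str.toList with hsdef
  set p := pattern.toList with hpdef
  set n := s.length with hn
  set m := p.length with hmz
  have hm' : 0 < m := hm
  by_cases hnm : n < m
  · rw [PySem.List.pyRange_one_eq_nil (by omega)]
    have hR : (List.range n).filter (fun i => decide (p <:+ s.take (i+1))) = [] := by
      rw [List.filter_eq_nil_iff]
      intro i hi
      simp only [List.mem_range] at hi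
      simp only [decide_eq_true_eq]
      intro hsfx
      have hlen := hsfx.length_le
      rw [List.length_take] at hlen
      omega
    rw [hR]
    simp
  · have hmn : m ≤ n := Nat.le_of_not_lt hnm
    have hb : (n : Int) - (m : Int) + 1 = ((n - m + 1 : Nat) : Int) := by omega
    rw [hb, PySem.List.pyRange_zero_natCast, List.filter_map]
    have hr : List.range n = List.range (m-1) ++ (List.range (n-m+1)).map (fun x => (m-1) + x) := by
      conv_lhs => rw [show n = (m-1) + (n-m+1) from by omega]
      exact List.range_add
    rw [hr, List.filter_append]
    have h0 : (List.range (m-1)).filter (fun i => decide (p <:+ s.take (i+1))) = [] := by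
      rw [List.filter_eq_nil_iff]
      intro i hi
      simp only [List.mem_range] at hi
      simp only [decide_eq_true_eq]
      intro hsfx
      have hlen := hsfx.length_le
      rw [List.length_take] at hlen
      omega
    rw [h0, List.nil_append, List.filter_map, List.map_map]
    have hfilter : (List.range (n-m+1)).filter
        ((fun i => decide (PySem.List.slice s (some i) (some (i + (m:Int))) = p)) ∘ (fun (k:Nat) => (k:Int)))
        = (List.range (n-m+1)).filter
        ((fun i => decide (p <:+ s.take (i+1))) ∘ (fun x => (m-1) + x)) := by
      refine List.filter_congr ?_
      intro t ht
      simp only [List.mem_range] at ht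
      simp only [Function.comp_apply]
      rw [PySem.List.slice_natCast_add]
      rw [show m - 1 + t + 1 = t + m from by omega]
      exact decide_eq_decide.mpr (occ_iff p s t (by omega) (by omega)).symm
    rw [hfilter]
    refine List.map_congr_left ?_
    intro t ht
    simp only [Function.comp_apply]
    have ht' : t < n - m + 1 := List.mem_range.mp (List.mem_filter.mp ht).1
    omega

-- ===== VERDICT (by name: the statement is the Claim_ definition above) =====
theorem KnuthMorris_spec : Claim_equal_KnuthMorris := by
  intro str pattern _ hpre
  unfold Spec_KnuthMorris
  have hm : 0 < pattern.toList.length := by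
    rcases Nat.eq_zero_or_pos pattern.toList.length with h | h
    · exact absurd (by ext1; simp [List.length_eq_zero_iff.mp h]) hpre
    · exact h
  rw [KnuthMorris_eq_kmpAcc str pattern hm, KnuthMorris_alt_eq_kmpAcc str pattern hm]
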